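-- pv_equiv track=rewrite | github.com/Nikinock/Team_Formater | ontology_analyzer.py | analyze_text
-- ===== SOURCE A (Python) =====
-- from collections import defaultdict
--
-- def extract_ngrams(text, n):
--     words = text.split()
--     return [' '.join(words[i:i+n]) for i in range(len(words)-n+1)]
--
-- def analyze_text(text, ontology_terms):
--     term_counts = defaultdict(int)
--     for term in ontology_terms:
--         # Разбиваем термин на слова, если он содержит '_'
--         term_words = term.split('_')
--         n = len(term_words)
--         if n > 1:
--             # Для терминов из нескольких слов ищем n-граммы
--             ngrams = extract_ngrams(text, n)
--             for ngram in ngrams: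
--                 if ngram == ' '.join(term_words):
--                     term_counts[term] += 1
--         else:
--             # Для одиночных слов ищем точное совпадение
--             term_counts[term] += text.count(term)
--     return term_counts
-- ===== SOURCE B (Python) =====
-- from collections import Counter
--
-- def analyze_text(text, ontology_terms):
--     words = text.split()
--     # one Counter of n-grams per distinct multi-word length n, built once
--     counters = {}
--     for term in ontology_terms:
--         n = len(term.split('_'))
--         if n > 1 and n not in counters:
--             counters[n] = Counter(' '.join(words[i:i+n]) for i in range(len(words)-n+1))
--     counts = {}
--     for term in ontology_terms:
--         tw = term.split('_')
--         if len(tw) > 1: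
--             c = counters[len(tw)][' '.join(tw)]
--             if c:
--                 counts[term] = counts.get(term, 0) + c
--         else:
--             counts[term] = counts.get(term, 0) + text.count(term)
--     return counts
-- ===== Notes on version B (the rewrite author's own statement) =====
-- stated objective: alternative
-- what changed: Instead of rescanning all n-grams of the text for every multi-word term, B builds the word list once and one Counter of n-grams per distinct multi-word length n, answering each multi-word term by a single dictionary lookup; single-word terms still use text.count.
import Mathlib
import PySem

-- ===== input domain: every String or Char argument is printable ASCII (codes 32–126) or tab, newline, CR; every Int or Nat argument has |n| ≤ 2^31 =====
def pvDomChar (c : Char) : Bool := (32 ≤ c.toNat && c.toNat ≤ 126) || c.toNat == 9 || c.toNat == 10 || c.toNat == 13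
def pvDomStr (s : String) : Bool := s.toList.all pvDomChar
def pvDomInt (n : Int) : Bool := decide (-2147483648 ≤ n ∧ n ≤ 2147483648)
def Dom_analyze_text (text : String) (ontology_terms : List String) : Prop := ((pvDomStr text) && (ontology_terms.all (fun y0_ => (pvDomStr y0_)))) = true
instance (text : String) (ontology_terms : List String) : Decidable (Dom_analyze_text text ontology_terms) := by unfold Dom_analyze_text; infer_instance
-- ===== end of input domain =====

-- B replaces A's per-term scan of all n-grams by one n-gram Counter per distinct multi-word
-- length n, built once and looked up per term (a different algorithm; same measured cost on random inputs).

-- ===== PORT A =====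
def extract_ngrams (text : String) (n : Int) : List String :=
  let words := PySem.Str.split₀ text
  (PySem.List.pyRange 0 ((words.length : Int) - n + 1) 1).map
    (fun i => PySem.Str.join " " (PySem.List.slice words (some i) (some (i + n))))

def analyze_text (text : String) (ontology_terms : List String) : List (String × Int) :=
  (ontology_terms.foldl
    (fun (term_counts : PySem.Dict String Int) term =>
      let term_words := (PySem.Str.split? term "_").getD []   -- sep "_" ≠ "": split? is always some
      let n := term_words.length
      if 1 < n then
        (extract_ngrams text (n : Int)).foldl
          (fun tc ngram =>
            if ngram == PySem.Str.join " " term_words then tc.modify term 0 (· + 1) else tc)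
          term_counts
      else
        term_counts.modify term 0 (· + (PySem.Str.count text term : Int)))
    PySem.Dict.empty).items

-- ===== PORT B =====
def pvNgramCounter (words : List String) (n : Nat) : PySem.Dict String Int :=
  PySem.Dict.counter
    ((PySem.List.pyRange 0 ((words.length : Int) - (n : Int) + 1) 1).map
      (fun i => PySem.Str.join " " (PySem.List.slice words (some i) (some (i + (n : Int))))))

def analyze_text_alt (text : String) (ontology_terms : List String) : List (String × Int) :=
  let words := PySem.Str.split₀ text
  let counters : PySem.Dict Nat (PySem.Dict String Int) := ontology_terms.foldl
    (fun counters term =>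
      let n := ((PySem.Str.split? term "_").getD []).length
      if 1 < n ∧ counters.contains n = false then counters.insert n (pvNgramCounter words n)
      else counters)
    PySem.Dict.empty
  (ontology_terms.foldl
    (fun (counts : PySem.Dict String Int) term =>
      let tw := (PySem.Str.split? term "_").getD []
      if 1 < tw.length then
        let c := ((counters.get? tw.length).getD PySem.Dict.empty).getD (PySem.Str.join " " tw) 0
        if c ≠ 0 then counts.insert term (counts.getD term 0 + c) else counts
      else
        counts.insert term (counts.getD term 0 + (PySem.Str.count text term : Int)))
    PySem.Dict.empty).items

-- ===== PRECONDITION & SPEC =====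
def Spec_analyze_text (text : String) (ontology_terms : List String) (out : List (String × Int)) : Prop := out = analyze_text_alt text ontology_terms
instance (text : String) (ontology_terms : List String) (out : List (String × Int)) : Decidable (Spec_analyze_text text ontology_terms out) := by unfold Spec_analyze_text; infer_instance

-- ===== CLAIM (what is proved, stated in full; the proofs are below) =====
def Claim_equal_analyze_text : Prop := ∀ (text : String) (ontology_terms : List String), Dom_analyze_text text ontology_terms → Spec_analyze_text text ontology_terms (analyze_text text ontology_terms)

-- ===== LEMMAS AND PROOFS =====

-- two successive 'd[k] += a' on the same key add up
lemma modify_add_modify (d : PySem.Dict String Int) (t : String) (a b : Int) :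
    (d.modify t 0 (· + a)).modify t 0 (· + b) = d.modify t 0 (· + (a + b)) := by
  simp only [PySem.Dict.modify, PySem.Dict.getD_insert_self, PySem.Dict.insert_insert_self,
    add_assoc]

-- A's inner n-gram loop is one 'd[t] += count' (and a no-op when the count is 0)
lemma foldl_modify_count (gs : List String) (j t : String) (d : PySem.Dict String Int) :
    gs.foldl (fun tc g => if g == j then tc.modify t 0 (· + 1) else tc) d
      = if gs.count j = 0 then d else d.modify t 0 (· + (gs.count j : Int)) := by
  induction gs generalizing d with
  | nil => simp
  | cons g gs ih =>
    simp only [List.foldl_cons, List.count_cons]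
    by_cases hg : g = j
    · simp only [hg, beq_self_eq_true, if_true, ih]
      by_cases h0 : gs.count j = 0 <;>
        simp [h0, modify_add_modify, add_comm]
    · have hb : (g == j) = false := beq_eq_false_iff_ne.mpr hg
      rw [if_neg (by simp [hb]), ih]
      simp [hg]

-- every dict stored in B's cache is the n-gram counter for its key
lemma counters_get?_good (words : List String) (terms : List String)
    (c0 : PySem.Dict Nat (PySem.Dict String Int))
    (h0 : ∀ m d', c0.get? m = some d' → d' = pvNgramCounter words m) :
    ∀ m d', (terms.foldl (fun counters term =>
        let n := ((PySem.Str.split? term "_").getD []).length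
        if 1 < n ∧ counters.contains n = false then counters.insert n (pvNgramCounter words n)
        else counters) c0).get? m = some d' → d' = pvNgramCounter words m := by
  induction terms generalizing c0 with
  | nil => exact h0
  | cons t ts ih =>
    simp only [List.foldl_cons]
    apply ih
    intro m d'
    by_cases hc : 1 < ((PySem.Str.split? t "_").getD []).length ∧
        c0.contains ((PySem.Str.split? t "_").getD []).length = false
    · rw [if_pos hc, PySem.Dict.get?_insert]
      split_ifs with hm
      · intro h; injection h with h; subst hm; exact h.symm
      · exact h0 m d'
    · rw [if_neg hc]; exact h0 m d'

-- keys of B's cache are never removed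
lemma counters_contains_mono (words : List String) (terms : List String)
    (c0 : PySem.Dict Nat (PySem.Dict String Int)) (m : Nat) (h : c0.contains m = true) :
    (terms.foldl (fun counters term =>
        let n := ((PySem.Str.split? term "_").getD []).length
        if 1 < n ∧ counters.contains n = false then counters.insert n (pvNgramCounter words n)
        else counters) c0).contains m = true := by
  induction terms generalizing c0 with
  | nil => exact h
  | cons t ts ih =>
    simp only [List.foldl_cons]
    apply ih
    by_cases hc : 1 < ((PySem.Str.split? t "_").getD []).length ∧
        c0.contains ((PySem.Str.split? t "_").getD []).length = false
    · rw [if_pos hc, PySem.Dict.contains_insert]; simp [h]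
    · rw [if_neg hc]; exact h

-- after the first pass, the cache holds a counter for every multi-word term of the list
lemma counters_covers (words : List String) (terms : List String)
    (c0 : PySem.Dict Nat (PySem.Dict String Int)) (t : String) (ht : t ∈ terms)
    (hn : 1 < ((PySem.Str.split? t "_").getD []).length) :
    (terms.foldl (fun counters term =>
        let n := ((PySem.Str.split? term "_").getD []).length
        if 1 < n ∧ counters.contains n = false then counters.insert n (pvNgramCounter words n)
        else counters) c0).contains ((PySem.Str.split? t "_").getD []).length = true := by
  induction terms generalizing c0 with
  | nil => cases ht
  | cons u ts ih =>
    simp only [List.foldl_cons]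
    rcases List.mem_cons.mp ht with rfl | hmem
    · apply counters_contains_mono
      by_cases hc : 1 < ((PySem.Str.split? t "_").getD []).length ∧
          c0.contains ((PySem.Str.split? t "_").getD []).length = false
      · rw [if_pos hc, PySem.Dict.contains_insert]; simp
      · rw [if_neg hc]
        rcases Bool.eq_false_or_eq_true
            (c0.contains ((PySem.Str.split? t "_").getD []).length) with htr | hf
        · exact htr
        · exact absurd ⟨hn, hf⟩ hc
    · exact ih _ hmem

lemma counters_get?_eq (words : List String) (terms : List String) (t : String)
    (ht : t ∈ terms) (hn : 1 < ((PySem.Str.split? t "_").getD []).length) :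
    (terms.foldl (fun counters term =>
        let n := ((PySem.Str.split? term "_").getD []).length
        if 1 < n ∧ counters.contains n = false then counters.insert n (pvNgramCounter words n)
        else counters) PySem.Dict.empty).get? ((PySem.Str.split? t "_").getD []).length
      = some (pvNgramCounter words ((PySem.Str.split? t "_").getD []).length) := by
  have hc := counters_covers words terms PySem.Dict.empty t ht hn
  rw [PySem.Dict.contains_eq_isSome_get?] at hc
  obtain ⟨d', hd⟩ := Option.isSome_iff_exists.mp hc
  rw [hd, counters_get?_good words terms PySem.Dict.empty
    (by intro m d' h; rw [PySem.Dict.get?_empty] at h; cases h) _ d' hd]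

-- B's cached counter is the counter of A's n-gram list
lemma pvNgramCounter_eq (text : String) (n : Nat) :
    pvNgramCounter (PySem.Str.split₀ text) n = PySem.Dict.counter (extract_ngrams text (n : Int)) := rfl

-- ===== VERDICT (by name: the statement is the Claim_ definition above) =====
theorem analyze_text_spec : Claim_equal_analyze_text := by
  intro text terms _
  unfold Spec_analyze_text analyze_text analyze_text_alt
  congr 1
  apply PySem.List.foldl_congr_mem
  intro d t ht
  by_cases hn : 1 < ((PySem.Str.split? t "_").getD []).length
  · rw [if_pos hn, if_pos hn, foldl_modify_count,
      counters_get?_eq (PySem.Str.split₀ text) terms t ht hn]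
    simp only [Option.getD_some, pvNgramCounter_eq, PySem.Dict.getD_counter]
    by_cases h0 : (extract_ngrams text (((PySem.Str.split? t "_").getD []).length : Int)).count
        (PySem.Str.join " " ((PySem.Str.split? t "_").getD [])) = 0
    · simp [h0]
    · rw [if_neg h0, if_pos (by exact_mod_cast h0)]
      rfl
  · rw [if_neg hn, if_neg hn]
    rfl
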